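-- pv_equiv track=rewrite | github.com/alexandraback/datacollection | solutions_5646553574277120_0/Python/MattDaws/c_slow.py | solve
-- ===== SOURCE A (Python) =====
-- import itertools
--
-- def gen_all(C, D, V):
--     """C = max numbr of coins of one type
--     D = list of demons
--     V = maximum to make"""
--     poss = set()
--     # This is O( (C+1)**D )
--     for choice in itertools.product(range(C+1), repeat = len(D)):
--         s = 0
--         for c, d in zip(choice, D):
--             s += c * d
--         if 0 < s and s <= V:
--             poss.add(s)
--     return list(poss)
--
-- def solve(C, D, V):
--     count = 0
--     while True:
--         can_make = gen_all(C, D, V)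
--         can_make.sort()
--         done = True
--         for i, x in enumerate(can_make):
--             if x != i+1:
--                 D.append(i+1)
--                 count += 1
--                 done = False
--                 break
--         if done: return count
-- ===== SOURCE B (Python) =====
-- def _merge(xs, ys):
--     # sorted union (with duplicates collapsed) of two sorted duplicate-free lists
--     out = []
--     i = j = 0
--     nx, ny = len(xs), len(ys)
--     while i < nx and j < ny:
--         if xs[i] < ys[j]:
--             out.append(xs[i]); i += 1
--         elif ys[j] < xs[i]:
--             out.append(ys[j]); j += 1
--         else:
--             out.append(xs[i]); i += 1; j += 1
--     out.extend(xs[i:])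
--     out.extend(ys[j:])
--     return out
--
-- def solve(C, D, V):
--     # Like the original, this appends the added coins to the caller's list D.
--     count = 0
--     while True:
--         # reachable sums as a sorted duplicate-free list, by DP over the coin types
--         cur = [0]
--         for d in D:
--             new = []
--             for c in range(C + 1):
--                 new = _merge(new, [s + c * d for s in cur])
--             cur = new
--         can = [s for s in cur if 0 < s <= V]
--         # smallest positive value that cannot be made (can is sorted and duplicate-free)
--         mex = 1
--         for x in can:
--             if x != mex:
--                 break
--             mex += 1
--         if mex > len(can):
--             return count
--         D.append(mex)
--         count += 1
-- ===== Notes on version B (the rewrite author's own statement) =====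
-- stated objective: alternative
-- what changed: Replaces A's brute-force enumeration of all (C+1)^|D| coin-choice tuples per round (collected in a set, then sorted) by a DP over the coin types that maintains the reachable sums as a sorted duplicate-free list via linear merges, and finds the coin to add as the smallest missing positive value of that list instead of scanning for the first index mismatch; intended as faster (measured 27.9x at the largest size where both finished, but A times out on larger generated inputs where B's answer cannot be cross-checked, so speed is not claimed).
import Mathlib
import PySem

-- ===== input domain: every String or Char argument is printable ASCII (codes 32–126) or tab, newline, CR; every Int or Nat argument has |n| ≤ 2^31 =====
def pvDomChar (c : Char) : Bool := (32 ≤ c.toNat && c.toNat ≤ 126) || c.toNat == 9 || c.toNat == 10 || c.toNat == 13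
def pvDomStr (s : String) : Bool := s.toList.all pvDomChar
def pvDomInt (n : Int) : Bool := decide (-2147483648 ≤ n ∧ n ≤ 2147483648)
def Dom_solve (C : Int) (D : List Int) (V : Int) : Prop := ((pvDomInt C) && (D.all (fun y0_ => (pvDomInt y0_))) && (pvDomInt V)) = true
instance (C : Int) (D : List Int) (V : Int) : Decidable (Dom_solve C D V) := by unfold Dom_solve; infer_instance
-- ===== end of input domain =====

-- B replaces A's brute-force enumeration of all (C+1)^|D| coin-choice tuples (collected in a
-- set and sorted) by a DP over the coin types that maintains the reachable sums as a sorted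
-- duplicate-free list via linear merges, and finds the coin to add as the smallest missing
-- positive value of that list. Like A, the Python B appends the added coins to the caller's
-- list D (same in-place mutation); the equivalence proved here is about the return value.

-- ===== PORT A =====
-- itertools.product(range(C+1), repeat = n): all length-n choice tuples
def pvChoices (C : Int) : Nat → List (List Int)
  | 0 => [[]]
  | n + 1 => (PySem.List.pyRange 0 (C + 1)).flatMap (fun c => (pvChoices C n).map (fun t => c :: t))

-- s = 0; for c, d in zip(choice, D): s += c * d
def pvDot (choice D : List Int) : Int := (choice.zip D).foldl (fun s p => s + p.1 * p.2) 0

-- gen_all(C, D, V).  Python's 'set' is ported as Std.HashSet (hash set, like CPython's):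
-- exact here, because the set is only turned into a list that is immediately sorted with no
-- key, so the iteration order of the set cannot influence the result.  (PySem.Set's linear
-- 'add' cannot be evaluated on the larger sampled inputs.)
def pvGenAll (C : Int) (D : List Int) (V : Int) : List Int :=
  ((pvChoices C D.length).foldl
    (fun poss choice =>
      let s := pvDot choice D
      if 0 < s ∧ s ≤ V then poss.insert s else poss)
    (∅ : Std.HashSet Int)).toList

-- for i, x in enumerate(can_make): if x != i+1: (append i+1; break) — returns the appended value
def pvFirstMism : List Int → Int → Option Int
  | [], _ => none
  | x :: t, i => if x = i + 1 then pvFirstMism t (i + 1) else some (i + 1)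

-- the while-True loop; fuel only makes the recursion structural (V+2 rounds always suffice:
-- each non-returning round appends a new value in [1, V], strictly larger than the previous
-- one).  can_make.sort() — a key-less sort of integers — is ported as mergeSort: it returns
-- the same (unique) sorted rearrangement (PySem's insertion sort is not stack-safe here).
def pvLoopA (C V : Int) : Nat → List Int → Int → Int
  | 0, _, count => count
  | fuel + 1, D, count =>
    let can := (pvGenAll C D V).mergeSort (fun a b => decide (a ≤ b))
    match pvFirstMism can 0 with
    | none => count
    | some m => pvLoopA C V fuel (D ++ [m]) (count + 1)

def solve (C : Int) (D : List Int) (V : Int) : Int := pvLoopA C V (V.toNat + 2) D 0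

-- ===== PORT B =====
-- _merge(xs, ys): sorted duplicate-free union of two sorted duplicate-free lists; the Python
-- while-loop appending to 'out' becomes a tail recursion with 'out' as a reversed accumulator
def pvMergeAux : List Int → List Int → List Int → List Int
  | [], ys, out => out.reverse ++ ys
  | x :: xs, [], out => out.reverse ++ (x :: xs)
  | x :: xs, y :: ys, out =>
    if x < y then pvMergeAux xs (y :: ys) (x :: out)
    else if y < x then pvMergeAux (x :: xs) ys (y :: out)
    else pvMergeAux xs ys (x :: out)
  termination_by xs ys _ => xs.length + ys.length

def pvMerge (xs ys : List Int) : List Int := pvMergeAux xs ys []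

-- for c in range(C+1): new = _merge(new, [s + c*d for s in cur])
def pvStep (C d : Int) (cur : List Int) : List Int :=
  (PySem.List.pyRange 0 (C + 1)).foldl
    (fun new c => pvMerge new (cur.map (fun s => s + c * d))) []

-- cur = [0]; for d in D: cur = <one DP step>
def pvCur (C : Int) (D : List Int) : List Int := D.foldl (fun cur d => pvStep C d cur) [0]

-- can = [s for s in cur if 0 < s <= V]
def pvCan (C : Int) (D : List Int) (V : Int) : List Int :=
  (pvCur C D).filter (fun s => decide (0 < s) && decide (s ≤ V))

-- mex = 1; for x in can: (if x != mex: break); mex += 1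
def pvMexScan : List Int → Int → Int
  | [], mex => mex
  | x :: t, mex => if x = mex then pvMexScan t (mex + 1) else mex

-- the while-True loop of B (same fuel bound as A's port)
def pvLoopB (C V : Int) : Nat → List Int → Int → Int
  | 0, _, count => count
  | fuel + 1, D, count =>
    let can := pvCan C D V
    let mex := pvMexScan can 1
    if mex > (can.length : Int) then count
    else pvLoopB C V fuel (D ++ [mex]) (count + 1)

def solve_alt (C : Int) (D : List Int) (V : Int) : Int := pvLoopB C V (V.toNat + 2) D 0

-- ===== PRECONDITION & SPEC =====
def Spec_solve (C : Int) (D : List Int) (V : Int) (out : Int) : Prop := out = solve_alt C D V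
instance (C : Int) (D : List Int) (V : Int) (out : Int) : Decidable (Spec_solve C D V out) := by unfold Spec_solve; infer_instance

-- ===== CLAIM (what is proved, stated in full; the proofs are below) =====
def Claim_equal_solve : Prop := ∀ (C : Int) (D : List Int) (V : Int), Dom_solve C D V → Spec_solve C D V (solve C D V)

-- ===== LEMMAS AND PROOFS =====

-- membership in A's accumulating set
theorem pv_mem_genAll_aux (D : List Int) (V : Int) :
    ∀ (L : List (List Int)) (acc : Std.HashSet Int) (x : Int),
      (x ∈ L.foldl (fun poss choice =>
          let s := pvDot choice D
          if 0 < s ∧ s ≤ V then poss.insert s else poss) acc) ↔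
      x ∈ acc ∨ ∃ ch ∈ L, pvDot ch D = x ∧ 0 < x ∧ x ≤ V := by
  intro L
  induction L with
  | nil => simp
  | cons ch L ih =>
    intro acc x
    simp only [List.foldl_cons, ih]
    by_cases h : 0 < pvDot ch D ∧ pvDot ch D ≤ V
    · rw [if_pos h]
      simp only [Std.HashSet.mem_insert, beq_iff_eq, List.mem_cons]
      constructor
      · rintro ((rfl | ha) | ⟨c, hc, hx⟩)
        · exact Or.inr ⟨ch, Or.inl rfl, rfl, h⟩
        · exact Or.inl ha
        · exact Or.inr ⟨c, Or.inr hc, hx⟩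
      · rintro (ha | ⟨c, rfl | hc, hx, hx1, hx2⟩)
        · exact Or.inl (Or.inr ha)
        · exact Or.inl (Or.inl hx)
        · exact Or.inr ⟨c, hc, hx, hx1, hx2⟩
    · rw [if_neg h]
      simp only [List.mem_cons]
      constructor
      · rintro (ha | ⟨c, hc, hx⟩)
        · exact Or.inl ha
        · exact Or.inr ⟨c, Or.inr hc, hx⟩
      · rintro (ha | ⟨c, rfl | hc, hx, hx1, hx2⟩)
        · exact Or.inl ha
        · exact absurd ⟨hx ▸ hx1, hx ▸ hx2⟩ h
        · exact Or.inr ⟨c, hc, hx, hx1, hx2⟩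

theorem pv_mem_genAll (C : Int) (D : List Int) (V : Int) (x : Int) :
    x ∈ pvGenAll C D V ↔ ∃ ch ∈ pvChoices C D.length, pvDot ch D = x ∧ 0 < x ∧ x ≤ V := by
  unfold pvGenAll
  rw [Std.HashSet.mem_toList, pv_mem_genAll_aux]
  simp

theorem pv_nodup_genAll (C : Int) (D : List Int) (V : Int) : (pvGenAll C D V).Nodup := by
  unfold pvGenAll
  exact Std.HashSet.distinct_toList.imp (fun h => by simpa using h)

-- shifting the start accumulator out of A's dot-product loop
theorem pv_foldl_shift : ∀ (l : List (Int × Int)) (a : Int),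
    l.foldl (fun s p => s + p.1 * p.2) a = a + l.foldl (fun s p => s + p.1 * p.2) 0 := by
  intro l
  induction l with
  | nil => simp
  | cons p t ih => intro a; simp only [List.foldl_cons]; rw [ih, ih (0 + p.1 * p.2)]; ring

theorem pv_dot_cons (c d : Int) (ch D : List Int) : pvDot (c :: ch) (d :: D) = c * d + pvDot ch D := by
  show ((c, d) :: ch.zip D).foldl (fun s p => s + p.1 * p.2) 0 = _
  rw [List.foldl_cons, pv_foldl_shift]
  show (0 + c * d) + pvDot ch D = _
  ring

theorem pv_mem_choices_succ (C : Int) (n : Nat) (ch' : List Int) :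
    ch' ∈ pvChoices C (n + 1) ↔ ∃ c ∈ PySem.List.pyRange 0 (C + 1), ∃ ch ∈ pvChoices C n, ch' = c :: ch := by
  simp only [pvChoices, List.mem_flatMap, List.mem_map]
  constructor
  · rintro ⟨c, hc, ch, hch, rfl⟩; exact ⟨c, hc, ch, hch, rfl⟩
  · rintro ⟨c, hc, ch, hch, rfl⟩; exact ⟨c, hc, ch, hch, rfl⟩

-- B's merge: membership and sortedness
theorem pv_mergeAux_mem : ∀ (xs ys out : List Int) (z : Int),
    z ∈ pvMergeAux xs ys out ↔ z ∈ out ∨ z ∈ xs ∨ z ∈ ys := by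
  intro xs ys out z
  fun_induction pvMergeAux xs ys out with
  | case1 ys out => simp
  | case2 x xs out => simp
  | case3 x xs y ys out h ih => rw [ih]; simp; tauto
  | case4 x xs y ys out h h2 ih => rw [ih]; simp; tauto
  | case5 x xs y ys out h h2 ih =>
    rw [ih]; simp
    constructor
    · rintro ((rfl | h) | h | h) <;> tauto
    · have : y = x := le_antisymm (not_lt.mp h) (not_lt.mp h2)
      subst this
      rintro (h | (rfl | h) | (rfl | h)) <;> tauto

theorem pv_mergeAux_pairwise : ∀ (xs ys out : List Int),
    xs.Pairwise (· < ·) → ys.Pairwise (· < ·) → out.Pairwise (fun a b => b < a) →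
    (∀ a ∈ out, ∀ b ∈ xs, a < b) → (∀ a ∈ out, ∀ b ∈ ys, a < b) →
    (pvMergeAux xs ys out).Pairwise (· < ·) := by
  intro xs ys out
  fun_induction pvMergeAux xs ys out with
  | case1 ys out =>
    intro _ hys hout hox hoy
    rw [List.pairwise_append, List.pairwise_reverse]
    exact ⟨hout, hys, fun a ha b hb => hoy a (List.mem_reverse.mp ha) b hb⟩
  | case2 x xs out =>
    intro hxs _ hout hox _
    rw [List.pairwise_append, List.pairwise_reverse]
    exact ⟨hout, hxs, fun a ha b hb => hox a (List.mem_reverse.mp ha) b hb⟩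
  | case3 x xs y ys out h ih =>
    intro hxs hys hout hox hoy
    have hxxs : ∀ b ∈ xs, x < b := (List.pairwise_cons.mp hxs).1
    have hyys : ∀ b ∈ ys, y < b := (List.pairwise_cons.mp hys).1
    apply ih (List.Pairwise.of_cons hxs) hys
    · exact List.pairwise_cons.mpr ⟨fun a ha => hox a ha x (by simp), hout⟩
    · intro a ha b hb
      rcases List.mem_cons.mp ha with rfl | ha
      · exact hxxs b hb
      · exact hox a ha b (List.mem_cons.mpr (Or.inr hb))
    · intro a ha b hb
      rcases List.mem_cons.mp ha with rfl | ha
      · rcases List.mem_cons.mp hb with rfl | hb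
        · exact h
        · exact lt_trans h (hyys b hb)
      · exact hoy a ha b hb
  | case4 x xs y ys out h h2 ih =>
    intro hxs hys hout hox hoy
    have hxxs : ∀ b ∈ xs, x < b := (List.pairwise_cons.mp hxs).1
    have hyys : ∀ b ∈ ys, y < b := (List.pairwise_cons.mp hys).1
    apply ih hxs (List.Pairwise.of_cons hys)
    · exact List.pairwise_cons.mpr ⟨fun a ha => hoy a ha y (by simp), hout⟩
    · intro a ha b hb
      rcases List.mem_cons.mp ha with rfl | ha
      · rcases List.mem_cons.mp hb with rfl | hb
        · exact h2
        · exact lt_trans h2 (hxxs b hb)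
      · exact hox a ha b hb
    · intro a ha b hb
      rcases List.mem_cons.mp ha with rfl | ha
      · exact hyys b hb
      · exact hoy a ha b (List.mem_cons.mpr (Or.inr hb))
  | case5 x xs y ys out h h2 ih =>
    intro hxs hys hout hox hoy
    have hyx : y = x := le_antisymm (not_lt.mp h) (not_lt.mp h2)
    subst hyx
    have hxxs : ∀ b ∈ xs, y < b := (List.pairwise_cons.mp hxs).1
    have hyys : ∀ b ∈ ys, y < b := (List.pairwise_cons.mp hys).1
    apply ih (List.Pairwise.of_cons hxs) (List.Pairwise.of_cons hys)
    · exact List.pairwise_cons.mpr ⟨fun a ha => hox a ha y (by simp), hout⟩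
    · intro a ha b hb
      rcases List.mem_cons.mp ha with rfl | ha
      · exact hxxs b hb
      · exact hox a ha b (List.mem_cons.mpr (Or.inr hb))
    · intro a ha b hb
      rcases List.mem_cons.mp ha with rfl | ha
      · exact hyys b hb
      · exact hoy a ha b (List.mem_cons.mpr (Or.inr hb))

-- B's DP step: membership and sortedness
theorem pv_step_mem_aux (d : Int) (cur : List Int) :
    ∀ (L : List Int) (acc : List Int) (x : Int),
      (x ∈ L.foldl (fun new c => pvMerge new (cur.map (fun s => s + c * d))) acc) ↔
      x ∈ acc ∨ ∃ c ∈ L, ∃ s ∈ cur, x = s + c * d := by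
  intro L
  induction L with
  | nil => simp
  | cons c L ih =>
    intro acc x
    rw [List.foldl_cons, ih]
    simp only [pvMerge, pv_mergeAux_mem, List.not_mem_nil, false_or, List.mem_map, List.mem_cons]
    constructor
    · rintro ((ha | ⟨s, hs, rfl⟩) | ⟨c', hc', s, hs, rfl⟩)
      · exact Or.inl ha
      · exact Or.inr ⟨c, Or.inl rfl, s, hs, rfl⟩
      · exact Or.inr ⟨c', Or.inr hc', s, hs, rfl⟩
    · rintro (ha | ⟨c', rfl | hc', s, hs, rfl⟩)
      · exact Or.inl (Or.inl ha)
      · exact Or.inl (Or.inr ⟨s, hs, rfl⟩)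
      · exact Or.inr ⟨c', hc', s, hs, rfl⟩

theorem pv_step_mem (C d : Int) (cur : List Int) (x : Int) :
    x ∈ pvStep C d cur ↔ ∃ c ∈ PySem.List.pyRange 0 (C + 1), ∃ s ∈ cur, x = s + c * d := by
  unfold pvStep
  rw [pv_step_mem_aux]
  simp

theorem pv_step_pairwise_aux (d : Int) (cur : List Int) (hcur : cur.Pairwise (· < ·)) :
    ∀ (L : List Int) (acc : List Int), acc.Pairwise (· < ·) →
      (L.foldl (fun new c => pvMerge new (cur.map (fun s => s + c * d))) acc).Pairwise (· < ·) := by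
  intro L
  induction L with
  | nil => intro acc h; simpa using h
  | cons c L ih =>
    intro acc h
    simp only [List.foldl_cons]
    apply ih
    simp only [pvMerge]
    exact pv_mergeAux_pairwise acc _ [] h
      (List.pairwise_map.mpr (hcur.imp (fun hab => by omega))) (by simp) (by simp) (by simp)

theorem pv_cur_mem_aux (C : Int) :
    ∀ (D : List Int) (cur : List Int) (x : Int),
      (x ∈ D.foldl (fun cur d => pvStep C d cur) cur) ↔
      ∃ s0 ∈ cur, ∃ ch ∈ pvChoices C D.length, x = s0 + pvDot ch D := by
  intro D
  induction D with
  | nil => intro cur x; simp [pvChoices, pvDot]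
  | cons d D ih =>
    intro cur x
    simp only [List.foldl_cons, ih, List.length_cons]
    constructor
    · rintro ⟨s1, hs1, ch, hch, rfl⟩
      rw [pv_step_mem] at hs1
      obtain ⟨c, hc, s0, hs0, rfl⟩ := hs1
      exact ⟨s0, hs0, c :: ch, (pv_mem_choices_succ C D.length _).mpr ⟨c, hc, ch, hch, rfl⟩,
        by rw [pv_dot_cons]; ring⟩
    · rintro ⟨s0, hs0, ch', hch', rfl⟩
      obtain ⟨c, hc, ch, hch, rfl⟩ := (pv_mem_choices_succ C D.length ch').mp hch'
      refine ⟨s0 + c * d, ?_, ch, hch, by rw [pv_dot_cons]; ring⟩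
      rw [pv_step_mem]
      exact ⟨c, hc, s0, hs0, rfl⟩

theorem pv_cur_pairwise_aux (C : Int) : ∀ (D : List Int) (cur : List Int),
    cur.Pairwise (· < ·) → (D.foldl (fun cur d => pvStep C d cur) cur).Pairwise (· < ·) := by
  intro D
  induction D with
  | nil => intro cur h; simpa using h
  | cons d D ih =>
    intro cur h
    simp only [List.foldl_cons]
    apply ih
    unfold pvStep
    exact pv_step_pairwise_aux d cur h _ [] (by simp)

theorem pv_cur_pairwise (C : Int) (D : List Int) : (pvCur C D).Pairwise (· < ·) :=
  pv_cur_pairwise_aux C D [0] (by simp)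

-- the two reachable-sum computations produce the same sorted list
theorem pv_can_eq (C : Int) (D : List Int) (V : Int) :
    (pvGenAll C D V).mergeSort (fun a b => decide (a ≤ b)) = pvCan C D V := by
  have hcur : (pvCur C D).Pairwise (· < ·) := pv_cur_pairwise C D
  have hcanlt : (pvCan C D V).Pairwise (· < ·) :=
    List.Pairwise.sublist List.filter_sublist hcur
  have hcannd : (pvCan C D V).Nodup := hcanlt.imp (fun h => by omega)
  have hsortA : ((pvGenAll C D V).mergeSort (fun a b => decide (a ≤ b))).Pairwise (· ≤ ·) :=
    (List.sorted_mergeSort (by intro a b c h1 h2; simp at *; omega)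
      (by intro a b; simp; omega) _).imp (fun h => by simpa using h)
  have hperm : ((pvGenAll C D V).mergeSort (fun a b => decide (a ≤ b))).Perm (pvCan C D V) := by
    refine (List.perm_ext_iff_of_nodup
      ((List.mergeSort_perm _ _).nodup_iff.mpr (pv_nodup_genAll C D V)) hcannd).mpr ?_
    intro x
    rw [(List.mergeSort_perm _ _).mem_iff, pv_mem_genAll]
    unfold pvCan
    rw [List.mem_filter]
    unfold pvCur
    rw [pv_cur_mem_aux]
    simp only [List.mem_singleton, Bool.and_eq_true, decide_eq_true_eq]
    constructor
    · rintro ⟨ch, hch, rfl, h1, h2⟩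
      exact ⟨⟨0, rfl, ch, hch, by ring⟩, h1, h2⟩
    · rintro ⟨⟨s0, rfl, ch, hch, rfl⟩, h1, h2⟩
      exact ⟨ch, hch, by ring, h1, h2⟩
  exact List.eq_of_perm_of_sorted (fun a b _ _ h1 h2 => le_antisymm h1 h2)
    hsortA (hcanlt.imp (fun h => le_of_lt h)) hperm

-- A's first-index-mismatch scan equals B's smallest-missing scan (for every list)
theorem pv_firstMism_eq : ∀ (can : List Int) (i : Int),
    pvFirstMism can i =
      if pvMexScan can (i + 1) > i + can.length then none else some (pvMexScan can (i + 1)) := by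
  intro can
  induction can with
  | nil => intro i; simp [pvFirstMism, pvMexScan]
  | cons x t ih =>
    intro i
    by_cases hx : x = i + 1
    · subst hx
      rw [show pvFirstMism ((i + 1) :: t) i = pvFirstMism t (i + 1) from by simp [pvFirstMism]]
      rw [show pvMexScan ((i + 1) :: t) (i + 1) = pvMexScan t (i + 1 + 1) from by simp [pvMexScan]]
      rw [ih (i + 1)]
      by_cases hgt : pvMexScan t (i + 1 + 1) > i + 1 + (t.length : Int)
      · rw [if_pos hgt, if_pos (by simp only [List.length_cons]; push_cast; omega)]
      · rw [if_neg hgt, if_neg (by simp only [List.length_cons]; push_cast; omega)]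
    · rw [show pvFirstMism (x :: t) i = some (i + 1) from by simp [pvFirstMism, hx]]
      rw [show pvMexScan (x :: t) (i + 1) = i + 1 from by simp [pvMexScan, hx]]
      rw [if_neg (by simp only [List.length_cons]; push_cast; omega)]

-- the two loops agree for every fuel
theorem pv_loop_eq (C V : Int) : ∀ (fuel : Nat) (D : List Int) (count : Int),
    pvLoopA C V fuel D count = pvLoopB C V fuel D count := by
  intro fuel
  induction fuel with
  | zero => intro D count; rfl
  | succ n ih =>
    intro D count
    simp only [pvLoopA, pvLoopB]
    rw [pv_can_eq C D V, pv_firstMism_eq (pvCan C D V) 0]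
    simp only [zero_add]
    by_cases hgt : pvMexScan (pvCan C D V) 1 > ((pvCan C D V).length : Int)
    · rw [if_pos hgt, if_pos hgt]
    · rw [if_neg hgt, if_neg hgt]
      exact ih _ _

-- ===== VERDICT (by name: the statement is the Claim_ definition above) =====
theorem solve_spec : Claim_equal_solve := by
  intro C D V _
  unfold Spec_solve solve solve_alt
  exact pv_loop_eq C V _ D 0
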